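-- pv_equiv track=rewrite | github.com/F12-Syntex/AdventOfCode-python | advent_of_code/2023/day03/Day3.py | findNumberString
-- ===== SOURCE A (Python) =====
-- def findNumberString(grid, x, y):
--     if not grid[y][x].isdigit():
--         return None
--
--     l, r = x-1, x+1
--     left, right = "", ""
--
--
--     #explore left
--     while l >= 0:
--         if grid[y][l].isdigit():
--             left += grid[y][l]
--         else:
--             break
--         l -= 1
--
--     while r < len(grid[y]):
--         if grid[y][r].isdigit():
--             right += grid[y][r]
--         else:
--             break
--         r += 1
--
--     return [l+1, r-1]
-- ===== SOURCE B (Python) =====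
-- def findNumberString(grid, x, y):
--     row = grid[y]
--     # one left-to-right pass: collect maximal digit runs as inclusive (start, end) spans
--     spans = []
--     start = None
--     for i, ch in enumerate(row):
--         if ch.isdigit():
--             if start is None:
--                 start = i
--         else:
--             if start is not None:
--                 spans.append((start, i - 1))
--                 start = None
--     if start is not None:
--         spans.append((start, len(row) - 1))
--     for a, b in spans:
--         if a <= x <= b:
--             return [a, b]
--     return None
-- ===== Notes on version B (the rewrite author's own statement) =====
-- stated objective: alternative
-- what changed: Replaces the local outward expansion (two while loops from x) by a single left-to-right pass that collects all maximal digit runs as inclusive spans and then returns the span containing x (no span means no digit at x).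
-- intended difference: For a negative in-range column index x whose wrapped-around character is a digit, A follows Python's negative-index wraparound and returns bounds like [-1, 2] mixing negative and wrapped positions, while B returns None because no digit run contains a negative column; B's is the intended value since a negative column is not a grid cell of any number. — e.g. on findNumberString(["123"], -1, 0): A returns some [-1, 2], B returns none
import Mathlib
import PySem

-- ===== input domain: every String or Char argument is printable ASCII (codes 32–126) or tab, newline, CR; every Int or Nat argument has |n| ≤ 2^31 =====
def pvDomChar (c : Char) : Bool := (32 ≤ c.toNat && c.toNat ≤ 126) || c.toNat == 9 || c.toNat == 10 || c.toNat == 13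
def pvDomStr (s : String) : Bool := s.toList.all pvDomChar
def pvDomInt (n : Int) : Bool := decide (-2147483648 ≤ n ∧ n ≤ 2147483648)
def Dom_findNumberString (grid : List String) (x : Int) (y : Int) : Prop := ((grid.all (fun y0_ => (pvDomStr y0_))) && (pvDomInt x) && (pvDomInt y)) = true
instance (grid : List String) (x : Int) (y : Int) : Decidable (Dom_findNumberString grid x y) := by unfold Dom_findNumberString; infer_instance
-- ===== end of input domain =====

-- B replaces A's outward expansion from x by one pass collecting all maximal digit runs, then a lookup
-- of the run containing x; equivalence is proved for non-negative in-range x, with the negative-index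
-- wraparound of A stated as an intended difference (D_ below).

-- ===== PORT A =====
-- A's 'explore left' while loop: l runs down from x-1 while digits; 'left' accumulates the chars (unused for the result's value, kept for fidelity).
def faLeft (row : List Char) (l : Int) (left : List Char) : Int × List Char :=
  if h : 0 ≤ l then
    let c := PySem.List.pyGetD row l ' '
    if PySem.Chars.isdigit c then faLeft row (l - 1) (left ++ [c]) else (l, left)
  else (l, left)
termination_by (l + 1).toNat
decreasing_by omega

-- A's right while loop: r runs up from x+1 while in range and digits.
def faRight (row : List Char) (r : Int) (right : List Char) : Int × List Char :=
  if h : r < (row.length : Int) then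
    let c := PySem.List.pyGetD row r ' '
    if PySem.Chars.isdigit c then faRight row (r + 1) (right ++ [c]) else (r, right)
  else (r, right)
termination_by ((row.length : Int) - r).toNat
decreasing_by omega

def findNumberString (grid : List String) (x : Int) (y : Int) : Option (List Int) :=
  let row := (PySem.List.pyGetD grid y "").toList
  if ¬ (PySem.Chars.isdigit (PySem.List.pyGetD row x ' ') = true) then none
  else
    let lres := faLeft row (x - 1) []
    let rres := faRight row (x + 1) []
    some [lres.1 + 1, rres.1 - 1]

-- ===== PORT B =====
-- Source B's single pass: absolute position i, 'st' is the pending run start; emits inclusive spans.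
def fbSpans (rem : List Char) (i : Nat) (st : Option Nat) : List (Nat × Nat) :=
  match rem with
  | [] => match st with
          | some a => [(a, i - 1)]
          | none => []
  | c :: t =>
    if PySem.Chars.isdigit c then
      fbSpans t (i + 1) (match st with | none => some i | some a => some a)
    else
      match st with
      | some a => (a, i - 1) :: fbSpans t (i + 1) none
      | none => fbSpans t (i + 1) none

-- Source B's final loop: first span whose inclusive range contains x.
def fbFind (spans : List (Nat × Nat)) (x : Int) : Option (List Int) :=
  match spans with
  | [] => none
  | (a, b) :: t => if (a : Int) ≤ x ∧ x ≤ (b : Int) then some [(a : Int), (b : Int)] else fbFind t x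

def findNumberString_alt (grid : List String) (x : Int) (y : Int) : Option (List Int) :=
  let row := (PySem.List.pyGetD grid y "").toList
  fbFind (fbSpans row 0 none) x

-- ===== PRECONDITION & SPEC =====
-- Pre_ excludes exactly the inputs where A raises IndexError: y outside grid's (Python, sign-aware)
-- index range, or x outside the index range of row y.
def Pre_findNumberString (grid : List String) (x : Int) (y : Int) : Prop :=
  PySem.Raise.InRange grid.length y ∧
  PySem.Raise.InRange ((PySem.List.pyGetD grid y "").toList.length) x
instance (grid : List String) (x : Int) (y : Int) : Decidable (Pre_findNumberString grid x y) := by unfold Pre_findNumberString; infer_instance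

def pvWitness_findNumberString : List String × Int × Int := (["a12b"], 1, 0)

-- Negative in-range x whose wrapped character is a digit: A wraps around (returning e.g. [-1, 2],
-- mixing a negative bound with wrapped positions), B returns none; B's is intended since a negative
-- column is not a cell of any number run.
def D_findNumberString (grid : List String) (x : Int) (y : Int) : Prop :=
  x < 0 ∧
  PySem.Raise.InRange ((PySem.List.pyGetD grid y "").toList.length) x ∧
  PySem.Chars.isdigit (PySem.List.pyGetD ((PySem.List.pyGetD grid y "").toList) x ' ') = true
instance (grid : List String) (x : Int) (y : Int) : Decidable (D_findNumberString grid x y) := by unfold D_findNumberString; infer_instance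

def Spec_findNumberString (grid : List String) (x : Int) (y : Int) (out : Option (List Int)) : Prop := ¬ D_findNumberString grid x y → out = findNumberString_alt grid x y
instance (grid : List String) (x : Int) (y : Int) (out : Option (List Int)) : Decidable (Spec_findNumberString grid x y out) := by unfold Spec_findNumberString; infer_instance

def pvDiffWitness_findNumberString : List String × Int × Int := (["123"], -1, 0)
def pvDiffWitnessOut_findNumberString : (Option (List Int)) × (Option (List Int)) := (some [-1, 2], none)

-- ===== CLAIM (what is proved, stated in full; the proofs are below) =====
def Claim_unchanged_findNumberString : Prop := ∀ (grid : List String) (x : Int) (y : Int), Dom_findNumberString grid x y → Pre_findNumberString grid x y → Spec_findNumberString grid x y (findNumberString grid x y)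
def Claim_changed_findNumberString : Prop := Dom_findNumberString (pvDiffWitness_findNumberString.1) (pvDiffWitness_findNumberString.2.1) (pvDiffWitness_findNumberString.2.2) ∧ Pre_findNumberString (pvDiffWitness_findNumberString.1) (pvDiffWitness_findNumberString.2.1) (pvDiffWitness_findNumberString.2.2) ∧ D_findNumberString (pvDiffWitness_findNumberString.1) (pvDiffWitness_findNumberString.2.1) (pvDiffWitness_findNumberString.2.2) ∧ findNumberString (pvDiffWitness_findNumberString.1) (pvDiffWitness_findNumberString.2.1) (pvDiffWitness_findNumberString.2.2) = pvDiffWitnessOut_findNumberString.1 ∧ findNumberString_alt (pvDiffWitness_findNumberString.1) (pvDiffWitness_findNumberString.2.1) (pvDiffWitness_findNumberString.2.2) = pvDiffWitnessOut_findNumberString.2 ∧ pvDiffWitnessOut_findNumberString.1 ≠ pvDiffWitnessOut_findNumberString.2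
def Claim_exact_findNumberString : Prop := ∀ (grid : List String) (x : Int) (y : Int), Dom_findNumberString grid x y → Pre_findNumberString grid x y → D_findNumberString grid x y → findNumberString grid x y ≠ findNumberString_alt grid x y

-- ===== LEMMAS AND PROOFS =====

-- left bound of the digit run ending at x (assuming s[x] is a digit)
def lbnd (s : List Char) : Nat → Nat
  | 0 => 0
  | (x + 1) => if PySem.Chars.isdigit (s.getD x ' ') then lbnd s x else x + 1

-- right bound of the digit run starting at x
def rbnd (s : List Char) (x : Nat) : Nat :=
  if h : x + 1 < s.length ∧ PySem.Chars.isdigit (s.getD (x + 1) ' ') then rbnd s (x + 1) else x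
termination_by s.length - x

theorem faLeft_spec (s : List Char) : ∀ (x : Nat), x ≤ s.length → ∀ acc,
    (faLeft s ((x : Int) - 1) acc).1 = (lbnd s x : Int) - 1 := by
  intro x
  induction x with
  | zero =>
    intro _ acc
    rw [faLeft]
    norm_num [lbnd]
  | succ n ih =>
    intro hn acc
    have hx : (((n + 1 : Nat)) : Int) - 1 = (n : Int) := by push_cast; omega
    rw [faLeft]
    rw [dif_pos (by push_cast; omega)]
    simp only [hx, PySem.List.pyGetD_natCast, lbnd]
    by_cases hd : PySem.Chars.isdigit (s.getD n ' ') = true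
    · rw [if_pos hd, if_pos hd]
      exact ih (by omega) _
    · rw [if_neg hd, if_neg hd]
      push_cast; ring

theorem faRight_spec (s : List Char) : ∀ (x : Nat), x < s.length → ∀ acc,
    (faRight s ((x : Int) + 1) acc).1 = (rbnd s x : Int) + 1 := by
  intro x
  induction hm : s.length - x using Nat.strong_induction_on generalizing x with
  | _ m ih =>
  intro hx acc
  rw [faRight, rbnd]
  by_cases h1 : x + 1 < s.length
  · rw [dif_pos (by push_cast; omega)]
    have : ((x : Int) + 1) = ((x + 1 : Nat) : Int) := by push_cast; ring
    simp only [this, PySem.List.pyGetD_natCast]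
    by_cases hd : PySem.Chars.isdigit (s.getD (x+1) ' ') = true
    · rw [if_pos hd, dif_pos ⟨h1, hd⟩]
      exact ih (s.length - (x+1)) (by omega) (x+1) rfl h1 _
    · rw [if_neg hd, dif_neg (by tauto)]; norm_num
  · rw [dif_neg (by push_cast; omega), dif_neg (by tauto)]

theorem fbFind_neg (sp : List (Nat × Nat)) (x : Int) (hx : x < 0) : fbFind sp x = none := by
  induction sp with
  | nil => rfl
  | cons p t ih =>
    obtain ⟨a, b⟩ := p
    simp only [fbFind]
    rw [if_neg, ih]
    omega

theorem fbFind_none_of_lt (sp : List (Nat × Nat)) (x : Int)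
    (h : ∀ p ∈ sp, x < (p.1 : Int)) : fbFind sp x = none := by
  induction sp with
  | nil => rfl
  | cons p t ih =>
    obtain ⟨a, b⟩ := p
    simp only [fbFind]
    rw [if_neg, ih]
    · intro q hq; exact h q (by simp [hq])
    · have := h (a, b) (by simp); omega

theorem fbSpans_lb : ∀ (rem : List Char) (i : Nat) (st : Option Nat),
    ∀ p ∈ fbSpans rem i st,
    (match st with | some a => min a i | none => i) ≤ p.1 := by
  intro rem
  induction rem with
  | nil =>
    intro i st p hp
    cases st with
    | none => simp [fbSpans] at hp
    | some a =>
      simp [fbSpans] at hp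
      subst hp
      show min a i ≤ a
      omega
  | cons c t ih =>
    intro i st p hp
    simp only [fbSpans] at hp
    by_cases hd : PySem.Chars.isdigit c = true
    · rw [if_pos hd] at hp
      cases st with
      | none =>
        have h2 : min i (i + 1) ≤ p.1 := ih (i+1) (some i) p hp
        show i ≤ p.1
        omega
      | some a =>
        have h2 : min a (i + 1) ≤ p.1 := ih (i+1) (some a) p hp
        show min a i ≤ p.1
        omega
    · rw [if_neg hd] at hp
      cases st with
      | none =>
        have h2 : i + 1 ≤ p.1 := ih (i+1) none p hp
        show i ≤ p.1
        omega
      | some a =>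
        show min a i ≤ p.1
        rcases List.mem_cons.mp hp with h | h
        · subst h
          show min a i ≤ a
          omega
        · have h2 : i + 1 ≤ p.1 := ih (i+1) none p h
          omega

def allDig (s : List Char) (a b : Nat) : Prop :=
  ∀ j, a ≤ j → j < b → PySem.Chars.isdigit (s.getD j ' ') = true

theorem lbnd_run (s : List Char) (a : Nat) (hb : a = 0 ∨ PySem.Chars.isdigit (s.getD (a - 1) ' ') = false) :
    ∀ (x : Nat), a ≤ x → allDig s a (x + 1) → lbnd s x = a := by
  intro x
  induction x with
  | zero => intro hax _; interval_cases a <;> rfl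
  | succ k ih =>
    intro hax hall
    by_cases hak : a = k + 1
    · subst hak
      rcases hb with h0 | hnd
      · omega
      · simp only [lbnd]
        rw [if_neg (by simpa using hnd)]
    · have hak' : a ≤ k := by omega
      have hdk : PySem.Chars.isdigit (s.getD k ' ') = true := hall k hak' (by omega)
      simp only [lbnd]
      rw [if_pos hdk]
      exact ih hak' (fun j hj1 hj2 => hall j hj1 (by omega))

theorem rbnd_run (s : List Char) (b : Nat) (hbn : b ≤ s.length)
    (hb : b = s.length ∨ PySem.Chars.isdigit (s.getD b ' ') = false) :
    ∀ (x : Nat), x < b → allDig s x b → rbnd s x = b - 1 := by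
  intro x
  induction hm : b - x using Nat.strong_induction_on generalizing x with
  | _ m ih =>
  intro hxb hall
  rw [rbnd]
  by_cases h1 : x + 1 < b
  · have hd : PySem.Chars.isdigit (s.getD (x + 1) ' ') = true := hall (x+1) (by omega) h1
    rw [dif_pos ⟨by omega, hd⟩]
    exact ih (b - (x+1)) (by omega) (x+1) rfl h1 (fun j hj1 hj2 => hall j (by omega) hj2)
  · have hbx : b = x + 1 := by omega
    rw [dif_neg]
    · omega
    · rintro ⟨hlt, hdig⟩
      rcases hb with h0 | hnd
      · omega
      · rw [hbx] at hnd
        exact absurd hdig (by rw [hnd]; simp)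

theorem fbSpans_main (s : List Char) : ∀ (rem : List Char) (i : Nat) (st : Option Nat),
    rem = s.drop i → i ≤ s.length →
    (match st with
     | none => i = 0 ∨ PySem.Chars.isdigit (s.getD (i - 1) ' ') = false
     | some a => a < i ∧ allDig s a i ∧ (a = 0 ∨ PySem.Chars.isdigit (s.getD (a - 1) ' ') = false)) →
    ∀ (x : Nat),
    (i ≤ x ∨ (∃ a, st = some a ∧ a ≤ x ∧ x < i)) →
    fbFind (fbSpans rem i st) (x : Int) =
      (if x < s.length ∧ PySem.Chars.isdigit (s.getD x ' ') = true
       then some [(lbnd s x : Int), (rbnd s x : Int)] else none) := by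
  intro rem
  induction rem with
  | nil =>
    intro i st hrem hin hinv x hx
    have hi : i = s.length := by
      have := List.drop_eq_nil_iff.mp hrem.symm
      omega
    cases st with
    | none =>
      simp only [fbSpans, fbFind]
      rcases hx with h | ⟨a, ha, _⟩
      · rw [if_neg (by omega)]
      · exact absurd ha (by simp)
    | some a =>
      obtain ⟨hai, hall, hbd⟩ := hinv
      simp only [fbSpans, fbFind]
      by_cases hax : a ≤ x ∧ x < i
      · rw [if_pos (by constructor <;> [omega ; omega])]
        have hdx : PySem.Chars.isdigit (s.getD x ' ') = true := hall x hax.1 hax.2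
        rw [if_pos ⟨by omega, hdx⟩]
        have hl : lbnd s x = a :=
          lbnd_run s a hbd x hax.1 (fun j hj1 hj2 => hall j hj1 (by omega))
        have hr : rbnd s x = i - 1 := by
          have := rbnd_run s i (by omega) (Or.inl hi) x hax.2
            (fun j hj1 hj2 => hall j (by omega) hj2)
          omega
        rw [hl, hr]
      · have hix : i ≤ x := by
          rcases hx with h | ⟨a', ha', h1, h2⟩
          · exact h
          · exact absurd ⟨by injection ha' with h; omega, h2⟩ hax
        rw [if_neg (by omega), if_neg (by omega)]
  | cons c t ih =>
    intro i st hrem hin hinv x hx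
    have hlen : i < s.length := by
      have := congrArg List.length hrem
      simp at this
      omega
    have hc : s.getD i ' ' = c := by
      have h0 : (s.drop i)[0]? = some c := by rw [← hrem]; rfl
      rw [List.getElem?_drop] at h0
      simp only [Nat.add_zero] at h0
      simp [List.getD_eq_getElem?_getD, h0]
    have ht : t = s.drop (i + 1) := by
      have : s.drop (i + 1) = (s.drop i).drop 1 := by
        rw [List.drop_drop]
      rw [this, ← hrem, List.drop_one, List.tail_cons]
    simp only [fbSpans]
    by_cases hd : PySem.Chars.isdigit c = true
    · rw [if_pos hd]
      cases st with
      | none =>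
        refine ih (i+1) (some i) ht (by omega) ⟨by omega, fun j hj1 hj2 => by
            have hji : j = i := by omega
            subst hji; rw [hc]; exact hd, hinv⟩ x ?_
        rcases hx with h | ⟨a, ha, _⟩
        · by_cases hxi : x = i
          · exact Or.inr ⟨i, rfl, by omega, by omega⟩
          · exact Or.inl (by omega)
        · exact absurd ha (by simp)
      | some a =>
        obtain ⟨hai, hall, hbd⟩ := hinv
        refine ih (i+1) (some a) ht (by omega) ⟨by omega, fun j hj1 hj2 => by
            by_cases hji : j = i
            · subst hji; rw [hc]; exact hd
            · exact hall j hj1 (by omega), hbd⟩ x ?_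
        rcases hx with h | ⟨a', ha', h1, h2⟩
        · by_cases hxi : x = i
          · exact Or.inr ⟨a, rfl, by omega, by omega⟩
          · exact Or.inl (by omega)
        · injection ha' with hh
          exact Or.inr ⟨a, rfl, by omega, by omega⟩
    · rw [if_neg hd]
      cases st with
      | none =>
        by_cases hxi : x = i
        · subst hxi
          rw [if_neg (by rintro ⟨_, hdd⟩; rw [hc] at hdd; exact hd hdd)]
          apply fbFind_none_of_lt
          intro p hp
          have := fbSpans_lb t (x+1) none p hp
          simp only at this
          omega
        · have hix1 : i + 1 ≤ x := by
            rcases hx with h | ⟨a, ha, _⟩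
            · omega
            · exact absurd ha (by simp)
          exact ih (i+1) none ht (by omega)
            (Or.inr (by rw [Nat.add_sub_cancel, hc]; exact Bool.not_eq_true _ ▸ hd)) x (Or.inl hix1)
      | some a =>
        obtain ⟨hai, hall, hbd⟩ := hinv
        simp only [fbFind]
        by_cases hax : a ≤ x ∧ x < i
        · rw [if_pos (by constructor <;> [omega ; omega])]
          have hdx : PySem.Chars.isdigit (s.getD x ' ') = true := hall x hax.1 hax.2
          rw [if_pos ⟨by omega, hdx⟩]
          have hl : lbnd s x = a :=
            lbnd_run s a hbd x hax.1 (fun j hj1 hj2 => hall j hj1 (by omega))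
          have hr : rbnd s x = i - 1 := by
            have := rbnd_run s i (by omega) (Or.inr (by rw [hc]; exact Bool.not_eq_true _ ▸ hd)) x hax.2
              (fun j hj1 hj2 => hall j (by omega) hj2)
            omega
          rw [hl, hr]
        · have hix : i ≤ x := by
            rcases hx with h | ⟨a', ha', h1, h2⟩
            · exact h
            · exact absurd ⟨by injection ha' with h; omega, h2⟩ hax
          rw [if_neg (by omega)]
          by_cases hxi : x = i
          · subst hxi
            rw [if_neg (by rintro ⟨_, hdd⟩; rw [hc] at hdd; exact hd hdd)]
            apply fbFind_none_of_lt
            intro p hp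
            have := fbSpans_lb t (x+1) none p hp
            simp only at this
            omega
          · exact ih (i+1) none ht (by omega)
              (Or.inr (by rw [Nat.add_sub_cancel, hc]; exact Bool.not_eq_true _ ▸ hd)) x (Or.inl (by omega))

theorem faRight_wit : (faRight ['1', '2', '3'] (-1 + 1) []).1 = 3 := by
  rw [faRight]
  norm_num [show PySem.List.pyGetD ['1','2','3'] (-1 + 1 : Int) ' ' = '1' from by decide,
    show PySem.Chars.isdigit '1' = true from by decide]
  rw [faRight]
  norm_num [show PySem.List.pyGetD ['1','2','3'] (1 : Int) ' ' = '2' from by decide,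
    show PySem.Chars.isdigit '2' = true from by decide]
  rw [faRight]
  norm_num [show PySem.List.pyGetD ['1','2','3'] (2 : Int) ' ' = '3' from by decide,
    show PySem.Chars.isdigit '3' = true from by decide]
  rw [faRight]
  norm_num

theorem faLeft_wit : (faLeft ['1', '2', '3'] (-1 - 1) []).1 = -2 := by
  rw [faLeft]
  norm_num


-- ===== VERDICT (by name: the statement is the Claim_ definition above) =====
theorem findNumberString_spec : Claim_unchanged_findNumberString := by
  intro grid x y _ hpre hnd
  obtain ⟨hy, hx⟩ := hpre
  have hxr := hx
  unfold PySem.Raise.InRange at hxr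
  show findNumberString grid x y = findNumberString_alt grid x y
  simp only [findNumberString, findNumberString_alt]
  set s : List Char := (PySem.List.pyGetD grid y "").toList with hs
  by_cases hx0 : 0 ≤ x
  · obtain ⟨xn, rfl⟩ : ∃ xn : Nat, x = (xn : Int) := ⟨x.toNat, (Int.toNat_of_nonneg hx0).symm⟩
    have hxlt : xn < s.length := by exact_mod_cast hxr.2
    have hmain := fbSpans_main s s 0 none (by simp) (Nat.zero_le _) (Or.inl rfl) xn
      (Or.inl (Nat.zero_le _))
    rw [PySem.List.pyGetD_natCast]
    by_cases hdig : PySem.Chars.isdigit (s.getD xn ' ') = true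
    · rw [if_neg (by simpa using hdig)]
      rw [hmain, if_pos ⟨hxlt, hdig⟩]
      rw [faLeft_spec s xn (le_of_lt hxlt) [], faRight_spec s xn hxlt []]
      norm_num
    · rw [if_pos (by simpa using hdig)]
      rw [hmain, if_neg (by tauto)]
  · have hxneg : x < 0 := by omega
    have hdig : ¬ (PySem.Chars.isdigit (PySem.List.pyGetD s x ' ') = true) :=
      fun h => hnd ⟨hxneg, hx, h⟩
    rw [if_pos hdig]
    rw [fbFind_neg _ _ hxneg]

theorem findNumberString_changed : Claim_changed_findNumberString := by
  unfold Claim_changed_findNumberString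
  refine ⟨by decide, by decide, by decide, ?_, by decide, by decide⟩
  show findNumberString ["123"] (-1) 0 = some [-1, 2]
  simp only [findNumberString]
  rw [show (PySem.List.pyGetD ["123"] (0 : Int) "").toList = ['1', '2', '3'] from by decide]
  rw [if_neg (by decide)]
  rw [faLeft_wit, faRight_wit]
  norm_num

theorem findNumberString_tight : Claim_exact_findNumberString := by
  intro grid x y _ hpre hD
  obtain ⟨hneg, hr, hdig⟩ := hD
  simp only [findNumberString, findNumberString_alt]
  rw [if_neg (by simpa using hdig)]
  rw [fbFind_neg _ _ hneg]
  simp
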